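-- pv_equiv track=rewrite | github.com/Mayortor/edabit-solutions | scrabble-scores-part2/main.py | best_start
-- ===== SOURCE A (Python) =====
-- def best_start(lst, word):
-- 	best_score = 0
-- 	best_score_index = 0
-- 	for i in range(len(lst) - len(word) + 1):
-- 		s = score(lst[i:i+len(word)], word)
-- 		if (s > best_score):
-- 			best_score = s
-- 			best_score_index = i
--
-- 	return best_score_index
--
-- def score(lst, word):
-- 	total = 0
-- 	multiplier = 1
-- 	values = {
-- 		'a': 1,
-- 		'b': 3,
-- 		'c': 3,
-- 		'd': 2,
-- 		'e': 1,
-- 		'f': 4,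
-- 		'g': 2,
-- 		'h': 4,
-- 		'i': 1,
-- 		'j': 8,
-- 		'k': 5,
-- 		'l': 2,
-- 		'm': 3,
-- 		'n': 1,
-- 		'o': 1,
-- 		'p': 3,
-- 		'q': 10,
-- 		'r': 1,
-- 		's': 1,
-- 		't': 1,
-- 		'u': 1,
-- 		'v': 4,
-- 		'w': 4,
-- 		'x': 8,
-- 		'y': 4,
-- 		'z': 10
-- 	}
--
-- 	for i in range(len(lst)):
-- 		letter_value = values[word[i].lower()]
-- 		if (lst[i] == 'DL'):
-- 			total += letter_value * 2
-- 		elif (lst[i] == 'TL'):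
-- 			total += letter_value * 3
-- 		elif (lst[i] == 'DW'):
-- 			multiplier *= 2
-- 		else:
-- 			total += letter_value
--
-- 	return (total * multiplier)
-- ===== SOURCE B (Python) =====
-- VALUES = {
--     'a': 1, 'b': 3, 'c': 3, 'd': 2, 'e': 1, 'f': 4, 'g': 2, 'h': 4,
--     'i': 1, 'j': 8, 'k': 5, 'l': 2, 'm': 3, 'n': 1, 'o': 1, 'p': 3,
--     'q': 10, 'r': 1, 's': 1, 't': 1, 'u': 1, 'v': 4, 'w': 4, 'x': 8,
--     'y': 4, 'z': 10,
-- }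
--
--
-- def best_start(lst, word):
--     n, m = len(lst), len(word)
--     if n - m + 1 <= 0:
--         return 0
--     vals = [VALUES[c.lower()] for c in word]
--     f = [0 if t == 'DW' else 2 if t == 'DL' else 3 if t == 'TL' else 1 for t in lst]
--     dw = [0]
--     for t in lst:
--         dw.append(dw[-1] + (t == 'DW'))
--     best, best_i = -1, 0
--     for i in range(n - m + 1):
--         s = 2 ** (dw[i + m] - dw[i]) * sum(vals[j] * f[i + j] for j in range(m))
--         if s > best:
--             best, best_i = s, i
--     return best_i
-- ===== Notes on version B (the rewrite author's own statement) =====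
-- stated objective: alternative
-- what changed: B precomputes the word's letter values, a per-tile score factor list and a prefix-sum table of DW counts once, then scans the offsets taking a dot product and a power per window, instead of A's per-offset slicing with repeated dict lookups and a branch chain inside the score loop.
import Mathlib
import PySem

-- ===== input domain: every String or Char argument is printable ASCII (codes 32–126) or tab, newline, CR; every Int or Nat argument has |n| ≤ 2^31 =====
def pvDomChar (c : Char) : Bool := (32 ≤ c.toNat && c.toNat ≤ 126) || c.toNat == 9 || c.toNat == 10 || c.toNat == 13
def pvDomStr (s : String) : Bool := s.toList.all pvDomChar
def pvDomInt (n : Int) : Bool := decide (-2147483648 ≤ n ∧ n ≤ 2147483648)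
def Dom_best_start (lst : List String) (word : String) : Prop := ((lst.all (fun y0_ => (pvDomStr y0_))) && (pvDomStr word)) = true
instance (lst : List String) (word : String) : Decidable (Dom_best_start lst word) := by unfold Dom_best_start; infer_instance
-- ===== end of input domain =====

-- B precomputes the word's letter values, per-tile factors and DW prefix sums once, then scans the offsets with a
-- dot product per window, instead of A's per-offset slicing + dict lookups + branch chain (objective: alternative).

-- ===== PORT A =====
-- the Scrabble letter values dict (shared literal constant; B's module-level VALUES is the same literal)
def pvValues : PySem.Dict Char Int := PySem.Dict.ofList
  [('a',1),('b',3),('c',3),('d',2),('e',1),('f',4),('g',2),('h',4),('i',1),('j',8),('k',5),('l',2),('m',3),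
   ('n',1),('o',1),('p',3),('q',10),('r',1),('s',1),('t',1),('u',1),('v',4),('w',4),('x',8),('y',4),('z',10)]

-- score(lst, word): values[word[i].lower()] raises KeyError on a non-letter — excluded by Pre_, so getD's default is
-- never the result inside Pre_; word[i] is always in range when called from best_start (the window has length len(word)).
def pvScoreA (lst : List String) (word : String) : Int :=
  let st := (PySem.List.pyRange 0 (PySem.List.len lst) 1).foldl
    (fun (st : Int × Int) i =>
      let letter_value := pvValues.getD (PySem.Chars.lowerChar (PySem.List.pyGetD word.toList i ' ')) 0
      let t := PySem.List.pyGetD lst i ""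
      if t = "DL" then (st.1 + letter_value * 2, st.2)
      else if t = "TL" then (st.1 + letter_value * 3, st.2)
      else if t = "DW" then (st.1, st.2 * 2)
      else (st.1 + letter_value, st.2)) (0, 1)
  st.1 * st.2

def best_start (lst : List String) (word : String) : Int :=
  let st := (PySem.List.pyRange 0 (PySem.List.len lst - PySem.Str.len word + 1) 1).foldl
    (fun (st : Int × Int) i =>
      let s := pvScoreA (PySem.List.slice lst (some i) (some (i + PySem.Str.len word))) word
      if s > st.1 then (s, i) else st) (0, 0)
  st.2

-- ===== PORT B =====
-- transliteration of Source B; VALUES[c.lower()] raises KeyError on a non-letter — excluded by Pre_ (same as A);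
-- 2 ** e with e = dw[i+m] - dw[i] ≥ 0 always, ported as 2 ^ e.toNat.
def best_start_alt (lst : List String) (word : String) : Int :=
  let n : Int := PySem.List.len lst
  let m : Int := PySem.Str.len word
  if n - m + 1 ≤ 0 then 0
  else
    let vals : List Int := word.toList.map (fun c => pvValues.getD (PySem.Chars.lowerChar c) 0)
    let f : List Int := lst.map (fun t => if t = "DW" then 0 else if t = "DL" then 2 else if t = "TL" then 3 else 1)
    let dw : List Int := lst.foldl (fun acc t => acc ++ [PySem.List.pyGetD acc (-1) 0 + (if t = "DW" then 1 else 0)]) [0]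
    let st := (PySem.List.pyRange 0 (n - m + 1) 1).foldl
      (fun (st : Int × Int) i =>
        let s := 2 ^ (PySem.List.pyGetD dw (i + m) 0 - PySem.List.pyGetD dw i 0).toNat *
          ((PySem.List.pyRange 0 m 1).map (fun j => PySem.List.pyGetD vals j 0 * PySem.List.pyGetD f (i + j) 0)).sum
        if s > st.1 then (s, i) else st) ((-1 : Int), (0 : Int))
    st.2

-- ===== PRECONDITION & SPEC =====
-- Pre_ excludes exactly the inputs where Python A raises KeyError: a window exists (len(word) ≤ len(lst)) and the
-- word contains a non-letter character; B raises there too.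
def Pre_best_start (lst : List String) (word : String) : Prop :=
  PySem.List.len lst < PySem.Str.len word ∨ word.toList.all (fun c => PySem.Chars.isalpha c) = true
instance (lst : List String) (word : String) : Decidable (Pre_best_start lst word) := by unfold Pre_best_start; infer_instance

def pvWitness_best_start : List String × String := (["DL", "x", "DW", "TL"], "ab")

def Spec_best_start (lst : List String) (word : String) (out : Int) : Prop := out = best_start_alt lst word
instance (lst : List String) (word : String) (out : Int) : Decidable (Spec_best_start lst word out) := by unfold Spec_best_start; infer_instance

-- ===== CLAIM (what is proved, stated in full; the proofs are below) =====
def Claim_equal_best_start : Prop := ∀ (lst : List String) (word : String), Dom_best_start lst word → Pre_best_start lst word → Spec_best_start lst word (best_start lst word)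

-- ===== LEMMAS AND PROOFS =====

-- proof-side abbreviations (definitionally the lambdas used in the ports)
def pvVal (c : Char) : Int := pvValues.getD (PySem.Chars.lowerChar c) 0
def pvFac (t : String) : Int := if t = "DL" then 2 else if t = "TL" then 3 else if t = "DW" then 0 else 1

lemma pvVal_nonneg (c : Char) : 0 ≤ pvVal c := by
  unfold pvVal
  cases hx : pvValues.get? (PySem.Chars.lowerChar c) with
  | none => rw [PySem.Dict.getD_eq_get?_getD, hx]; simp
  | some v =>
    rw [PySem.Dict.getD_eq_get?_getD, hx]
    have hv : v ∈ pvValues.values := List.mem_map_of_mem (PySem.Dict.mem_items_of_get?_eq_some _ hx)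
    have hall : ∀ w ∈ pvValues.values, 0 ≤ w := by decide
    simpa using hall v hv

lemma pvFac_eq (t : String) :
    (if t = "DW" then (0:Int) else if t = "DL" then 2 else if t = "TL" then 3 else 1) = pvFac t := by
  unfold pvFac; split_ifs with h1 h2 h3 <;> simp_all

-- a loop that adds to one accumulator and multiplies the other is a (sum, product)
lemma pvFoldPair (L : List Int) (add mul : Int → Int) (t0 mu0 : Int) :
    L.foldl (fun st j => (st.1 + add j, st.2 * mul j)) (t0, mu0)
      = (t0 + (L.map add).sum, mu0 * (L.map mul).prod) := by
  induction L generalizing t0 mu0 with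
  | nil => simp
  | cons x xs ih => simp [ih]; constructor <;> ring

-- A's score loop in closed form
lemma pvScoreA_closed (w : List String) (word : String) :
    pvScoreA w word
      = ((PySem.List.pyRange 0 (w.length : Int) 1).map
            (fun j => pvFac (PySem.List.pyGetD w j "") * pvVal (PySem.List.pyGetD word.toList j ' '))).sum
        * ((PySem.List.pyRange 0 (w.length : Int) 1).map
            (fun j => if PySem.List.pyGetD w j "" = "DW" then (2:Int) else 1)).prod := by
  unfold pvScoreA
  simp only [PySem.List.len_eq]
  have hb : (fun (st : Int × Int) i =>
      let letter_value := pvValues.getD (PySem.Chars.lowerChar (PySem.List.pyGetD word.toList i ' ')) 0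
      let t := PySem.List.pyGetD w i ""
      if t = "DL" then (st.1 + letter_value * 2, st.2)
      else if t = "TL" then (st.1 + letter_value * 3, st.2)
      else if t = "DW" then (st.1, st.2 * 2)
      else (st.1 + letter_value, st.2))
    = (fun (st : Int × Int) j =>
        (st.1 + pvFac (PySem.List.pyGetD w j "") * pvVal (PySem.List.pyGetD word.toList j ' '),
         st.2 * (if PySem.List.pyGetD w j "" = "DW" then 2 else 1))) := by
    funext st j
    simp only [pvFac, pvVal]
    split_ifs with h1 h2 h3 <;> simp_all <;> ring
  rw [hb, pvFoldPair]
  simp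

lemma pvProd_ite_pow (w : List String) :
    (w.map (fun t => if t = "DW" then (2:Int) else 1)).prod = 2 ^ (w.countP (fun t => t = "DW")) := by
  induction w with
  | nil => simp
  | cons t r ih =>
    by_cases h : t = "DW"
    · simp [h, ih, pow_succ]; ring
    · simp [h, ih]

-- the dw prefix-sum loop in closed form
lemma pvDw_closed (lst : List String) :
    lst.foldl (fun acc t => acc ++ [PySem.List.pyGetD acc (-1) 0 + (if t = "DW" then 1 else 0)]) [0]
      = (List.range (lst.length + 1)).map (fun k => ((lst.take k).countP (fun t => t = "DW") : Int)) := by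
  induction lst using List.reverseRecOn with
  | nil => simp
  | append_singleton l t ih =>
    rw [List.foldl_append, ih]
    simp only [List.foldl_cons, List.foldl_nil]
    have hlast : PySem.List.pyGetD
        ((List.range (l.length + 1)).map (fun k => (((l.take k).countP (fun t => t = "DW") : Nat) : Int))) (-1) 0
        = ((l.countP (fun t => t = "DW") : Nat) : Int) := by
      rw [List.range_succ, List.map_append]
      simp only [List.map_cons, List.map_nil, List.take_length]
      exact PySem.List.pyGetD_neg_one_append_singleton _ _ _
    rw [hlast]
    have hsplitR : (List.range ((l ++ [t]).length + 1)).map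
          (fun k => ((((l ++ [t]).take k).countP (fun t => t = "DW") : Nat) : Int))
        = (List.range (l.length + 1)).map
            (fun k => ((((l ++ [t]).take k).countP (fun t => t = "DW") : Nat) : Int))
          ++ [(((l ++ [t]).countP (fun t => t = "DW") : Nat) : Int)] := by
      rw [show (l ++ [t]).length + 1 = (l.length + 1) + 1 by simp, List.range_succ]
      simp [List.take_of_length_le]
    rw [hsplitR]
    congr 1
    · apply List.map_congr_left
      intro k hk
      rw [List.mem_range] at hk
      rw [List.take_append_of_le_length (by omega)]
    · congr 1
      rw [List.countP_append]
      by_cases h : t = "DW" <;> simp [h]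

lemma pvDw_getD (lst : List String) (k : Nat) (hk : k ≤ lst.length) :
    PySem.List.pyGetD
        (lst.foldl (fun acc t => acc ++ [PySem.List.pyGetD acc (-1) 0 + (if t = "DW" then 1 else 0)]) [0])
        ((k : Nat) : Int) 0
      = ((lst.take k).countP (fun t => t = "DW") : Int) := by
  rw [pvDw_closed, PySem.List.pyGetD_natCast]
  rw [List.getD_eq_getElem?_getD, List.getElem?_map, List.getElem?_range (by omega)]
  simp

-- a pyGetD from a list of nonnegative Ints with nonnegative default is nonnegative
lemma pvGetD_nonneg (L : List Int) (j d : Int) (hd : 0 ≤ d) (h : ∀ x ∈ L, 0 ≤ x) :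
    0 ≤ PySem.List.pyGetD L j d := by
  show 0 ≤ (PySem.List.pyGet? L j).getD d
  cases hx : PySem.List.pyGet? L j with
  | none => simpa using hd
  | some x => simpa using h x (PySem.List.mem_of_pyGet?_eq_some L hx)

-- seeding the running best with -1 instead of 0 gives the same result when the first score is ≥ 0
lemma pvSeed_bridge (K : Int) (hK : 0 < K) (s : Int → Int) (h0 : 0 ≤ s 0) :
    (PySem.List.pyRange 0 K 1).foldl (fun (st : Int × Int) i => if s i > st.1 then (s i, i) else st) ((-1 : Int), (0 : Int))
      = (PySem.List.pyRange 0 K 1).foldl (fun (st : Int × Int) i => if s i > st.1 then (s i, i) else st) ((0 : Int), (0 : Int)) := by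
  rw [PySem.List.pyRange_one_cons hK]
  simp only [List.foldl_cons]
  have h1 : (if s 0 > (-1 : Int) then (s 0, (0:Int)) else ((-1 : Int), (0:Int))) = (s 0, (0:Int)) := by
    rw [if_pos (by omega)]
  rw [h1]
  by_cases hp : s 0 > 0
  · rw [if_pos hp]
  · rw [if_neg hp]
    have : s 0 = 0 := by omega
    rw [this]


def pvSB (lst : List String) (word : String) (i : Int) : Int :=
  2 ^ (PySem.List.pyGetD
          (lst.foldl (fun acc t => acc ++ [PySem.List.pyGetD acc (-1) 0 + (if t = "DW" then 1 else 0)]) ([0] : List Int))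
          (i + (word.toList.length : Int)) 0
        - PySem.List.pyGetD
          (lst.foldl (fun acc t => acc ++ [PySem.List.pyGetD acc (-1) 0 + (if t = "DW" then 1 else 0)]) ([0] : List Int))
          i 0).toNat *
    ((PySem.List.pyRange 0 (word.toList.length : Int) 1).map
      (fun j => PySem.List.pyGetD (word.toList.map (fun c => pvValues.getD (PySem.Chars.lowerChar c) 0)) j 0 *
        PySem.List.pyGetD
          (lst.map (fun t => if t = "DW" then 0 else if t = "DL" then 2 else if t = "TL" then 3 else 1))
          (i + j) 0)).sum

lemma pvWindow_eq (lst : List String) (word : String) (i : Int)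
    (h0 : 0 ≤ i) (h1 : i + (word.toList.length : Int) ≤ (lst.length : Int)) :
    pvScoreA (PySem.List.slice lst (some i) (some (i + (word.toList.length : Int)))) word
      = pvSB lst word i := by
  obtain ⟨iN, rfl⟩ : ∃ k : Nat, i = (k : Int) := ⟨i.toNat, (Int.toNat_of_nonneg h0).symm⟩
  have hi : iN + word.toList.length ≤ lst.length := by exact_mod_cast h1
  rw [PySem.List.slice_natCast_add]
  set w := (lst.drop iN).take word.toList.length with hw
  have hwlen : w.length = word.toList.length := by
    rw [hw, List.length_take, List.length_drop]; omega
  rw [pvScoreA_closed, hwlen]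
  have hprod : ((PySem.List.pyRange 0 (word.toList.length : Int) 1).map
      (fun j => if PySem.List.pyGetD w j "" = "DW" then (2:Int) else 1)).prod
      = 2 ^ (w.countP (fun t => t = "DW")) := by
    rw [show (fun j => if PySem.List.pyGetD w j "" = "DW" then (2:Int) else 1)
          = (fun t => if t = "DW" then (2:Int) else 1) ∘ (fun j => PySem.List.pyGetD w j "") from rfl,
        ← List.map_map, ← hwlen, PySem.List.map_pyGetD_pyRange_zero']
    exact pvProd_ite_pow w
  have hsum : ((PySem.List.pyRange 0 (word.toList.length : Int) 1).map
        (fun j => pvFac (PySem.List.pyGetD w j "") * pvVal (PySem.List.pyGetD word.toList j ' ')))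
      = ((PySem.List.pyRange 0 (word.toList.length : Int) 1).map
        (fun j => PySem.List.pyGetD (word.toList.map (fun c => pvValues.getD (PySem.Chars.lowerChar c) 0)) j 0 *
          PySem.List.pyGetD
            (lst.map (fun t => if t = "DW" then 0 else if t = "DL" then 2 else if t = "TL" then 3 else 1))
            ((iN : Int) + j) 0)) := by
    apply List.map_congr_left
    intro j hj
    rw [PySem.List.mem_pyRange_one] at hj
    obtain ⟨jN, rfl⟩ : ∃ k : Nat, j = (k : Int) := ⟨j.toNat, (Int.toNat_of_nonneg hj.1).symm⟩
    have hjm : jN < word.toList.length := by exact_mod_cast hj.2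
    have h2 : (iN : Int) + (jN : Int) = ((iN + jN : Nat) : Int) := by push_cast; ring
    rw [h2]
    simp only [PySem.List.pyGetD_natCast]
    have hwj : w[jN]'(by omega) = lst[iN + jN]'(by omega) := by
      simp only [hw, List.getElem_take, List.getElem_drop]
    rw [List.getD_eq_getElem _ _ (by omega : jN < w.length),
        List.getD_eq_getElem _ _ (by simpa using hjm),
        List.getD_eq_getElem _ _ (by simpa using hjm :
          jN < (word.toList.map (fun c => pvValues.getD (PySem.Chars.lowerChar c) 0)).length),
        List.getD_eq_getElem _ _ (by simp; omega :
          iN + jN < (lst.map (fun t => if t = "DW" then (0:Int) else if t = "DL" then 2 else if t = "TL" then 3 else 1)).length),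
        List.getElem_map, List.getElem_map, hwj, pvFac_eq]
    simp only [pvVal]
    exact mul_comm _ _
  have hdw : (PySem.List.pyGetD
        (lst.foldl (fun acc t => acc ++ [PySem.List.pyGetD acc (-1) 0 + (if t = "DW" then 1 else 0)]) ([0] : List Int))
        ((iN : Int) + (word.toList.length : Int)) 0
      - PySem.List.pyGetD
        (lst.foldl (fun acc t => acc ++ [PySem.List.pyGetD acc (-1) 0 + (if t = "DW" then 1 else 0)]) ([0] : List Int))
        (iN : Int) 0).toNat = w.countP (fun t => t = "DW") := by
    rw [show (iN : Int) + (word.toList.length : Int) = ((iN + word.toList.length : Nat) : Int) by push_cast; ring]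
    rw [pvDw_getD _ _ (by omega), pvDw_getD _ _ (by omega)]
    rw [List.take_add, List.countP_append, ← hw]
    push_cast
    omega
  unfold pvSB
  rw [hsum, hprod, hdw]
  exact mul_comm _ _

-- ===== VERDICT (by name: the statement is the Claim_ definition above) =====
theorem best_start_spec : Claim_equal_best_start := by
  intro lst word _ _
  unfold Spec_best_start best_start best_start_alt
  simp only [PySem.List.len_eq, PySem.Str.len_eq]
  by_cases hK : (lst.length : Int) - (word.toList.length : Int) + 1 ≤ 0
  · rw [if_pos hK, PySem.List.pyRange_one_eq_nil (by omega)]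
    simp
  · rw [if_neg hK]
    have hnn : 0 ≤ pvSB lst word 0 := by
      unfold pvSB
      apply mul_nonneg (pow_nonneg (by norm_num) _)
      apply List.sum_nonneg
      intro x hx
      obtain ⟨j, hj, rfl⟩ := List.mem_map.mp hx
      apply mul_nonneg
      · apply pvGetD_nonneg _ _ _ le_rfl
        intro v hv
        obtain ⟨c, _, rfl⟩ := List.mem_map.mp hv
        exact pvVal_nonneg c
      · apply pvGetD_nonneg _ _ _ le_rfl
        intro v hv
        obtain ⟨t, _, rfl⟩ := List.mem_map.mp hv
        split_ifs <;> norm_num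
    have main : ((PySem.List.pyRange 0 ((lst.length : Int) - (word.toList.length : Int) + 1) 1).foldl
          (fun (st : Int × Int) i =>
            if pvScoreA (PySem.List.slice lst (some i) (some (i + (word.toList.length : Int)))) word > st.1 then
              (pvScoreA (PySem.List.slice lst (some i) (some (i + (word.toList.length : Int)))) word, i)
            else st) (0, 0)).2
        = ((PySem.List.pyRange 0 ((lst.length : Int) - (word.toList.length : Int) + 1) 1).foldl
          (fun (st : Int × Int) i =>
            if pvSB lst word i > st.1 then (pvSB lst word i, i) else st) ((-1 : Int), (0 : Int))).2 := by
      rw [pvSeed_bridge _ (by omega) (pvSB lst word) hnn]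
      congr 1
      apply PySem.List.foldl_congr_mem
      intro acc i hi
      rw [PySem.List.mem_pyRange_one] at hi
      rw [pvWindow_eq lst word i hi.1 (by omega)]
    exact main
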